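-- pv_equiv track=rewrite | github.com/sysll/GAMattention | univariate analysis/S1_IgG univariate analysis.py | Get_ID_length_list
-- ===== SOURCE A (Python) =====
-- def Get_ID_length_list(ID_list:list):
--     buffer_ID = ''
--     temp_number = 0
--     length_list = []
--     for ID in ID_list:
--         if buffer_ID != ID:
--             length_list.append(temp_number)
--             temp_number = 1
--             buffer_ID = ID
--         else:
--             temp_number +=1
--     length_list.append(temp_number)
--     we_want = length_list[1:]
--     return we_want
-- ===== SOURCE B (Python) =====
-- def Get_ID_length_list(ID_list: list):
--     n = len(ID_list)
--     # positions where the ID changes from its predecessor (predecessor of the first is '')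
--     cuts = [i for i, (prev, cur) in enumerate(zip([''] + ID_list, ID_list)) if prev != cur]
--     # each cut's run extends to the next cut (or the end of the list)
--     return [b - a for a, b in zip(cuts, cuts[1:] + [n])]
-- ===== Notes on version B (the rewrite author's own statement) =====
-- stated objective: alternative
-- what changed: Replaces A's single-pass buffer/counter accumulator with two staged passes: first collect the change-point indices (each element compared with its predecessor, '' before the first), then emit run lengths as differences of consecutive change points.
import Mathlib
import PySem

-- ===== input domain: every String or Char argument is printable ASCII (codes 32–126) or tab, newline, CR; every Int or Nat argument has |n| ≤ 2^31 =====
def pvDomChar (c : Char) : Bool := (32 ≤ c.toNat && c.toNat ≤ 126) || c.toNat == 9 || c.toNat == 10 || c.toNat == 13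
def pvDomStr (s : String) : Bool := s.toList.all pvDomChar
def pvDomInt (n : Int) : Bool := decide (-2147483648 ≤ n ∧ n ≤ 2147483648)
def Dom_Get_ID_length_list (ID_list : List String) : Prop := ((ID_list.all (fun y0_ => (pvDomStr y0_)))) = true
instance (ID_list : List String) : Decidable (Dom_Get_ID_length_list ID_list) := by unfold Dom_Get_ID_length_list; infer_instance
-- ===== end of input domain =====

-- B computes the same run-length list by two staged passes — change-point indices
-- (each ID vs its predecessor, '' before the first), then adjacent differences —
-- instead of A's buffer/counter accumulator loop (alternative decomposition, same cost).

-- ===== PORT A =====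
-- A's loop state: (buffer_ID, temp_number, length_list)
def getIDStep (st : String × Int × List Int) (ID : String) : String × Int × List Int :=
  if st.1 ≠ ID then (ID, 1, st.2.2 ++ [st.2.1]) else (st.1, st.2.1 + 1, st.2.2)

def Get_ID_length_list (ID_list : List String) : List Int :=
  let st := ID_list.foldl getIDStep ("", 0, [])
  let length_list := st.2.2 ++ [st.2.1]
  length_list.drop 1

-- ===== PORT B =====
-- cuts = [i for i, (prev, cur) in enumerate(zip([''] + ID_list, ID_list)) if prev != cur]
-- return [b - a for a, b in zip(cuts, cuts[1:] + [n])]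
def Get_ID_length_list_alt (ID_list : List String) : List Int :=
  let n : Int := ID_list.length
  let cuts : List Int :=
    ((PySem.List.enumerate (("" :: ID_list).zip ID_list) 0).filter
      (fun p => p.2.1 != p.2.2)).map (fun p => p.1)
  (cuts.zip (cuts.drop 1 ++ [n])).map (fun p => p.2 - p.1)

-- ===== PRECONDITION & SPEC =====
def Spec_Get_ID_length_list (ID_list : List String) (out : List Int) : Prop := out = Get_ID_length_list_alt ID_list
instance (ID_list : List String) (out : List Int) : Decidable (Spec_Get_ID_length_list ID_list out) := by unfold Spec_Get_ID_length_list; infer_instance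

-- ===== CLAIM (what is proved, stated in full; the proofs are below) =====
def Claim_equal_Get_ID_length_list : Prop := ∀ (ID_list : List String), Dom_Get_ID_length_list ID_list → Spec_Get_ID_length_list ID_list (Get_ID_length_list ID_list)

-- ===== LEMMAS AND PROOFS =====

-- run lengths of a list from a running (buffer, count) state: common reference point
def groupLensGo (cur : String) (n : Int) : List String → List Int
  | [] => [n]
  | y :: ys => if y = cur then groupLensGo cur (n + 1) ys else n :: groupLensGo y 1 ys

-- recursive characterisation of B's change-point list (absolute positions k, k+1, …)
def rcuts (k : Int) (prev : String) : List String → List Int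
  | [] => []
  | y :: ys => (if prev ≠ y then [k] else []) ++ rcuts (k + 1) y ys

-- recursive characterisation of B's difference pass over a nonempty cut list
def diffsFrom (c : Int) : List Int → Int → List Int
  | [], n => [n - c]
  | b :: bs, n => (b - c) :: diffsFrom b bs n

-- B's difference pass including the empty-cut-list case
def mapDiffs : List Int → Int → List Int
  | [], _ => []
  | c :: cs, n => diffsFrom c cs n

-- A's fold, continued from any state, produces the already-accumulated list followed by
-- exactly the run lengths groupLensGo would emit from the same (buffer, count) state.
theorem foldl_step_eq_go (l : List String) :
    ∀ (buf : String) (t : Int) (acc : List Int),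
      (let st := l.foldl getIDStep (buf, t, acc); st.2.2 ++ [st.2.1]) = acc ++ groupLensGo buf t l := by
  induction l with
  | nil => intro buf t acc; simp [groupLensGo]
  | cons y ys ih =>
    intro buf t acc
    by_cases h : buf = y
    · subst h
      simp [List.foldl, getIDStep, groupLensGo, ih]
    · simp [List.foldl, getIDStep, groupLensGo, h, Ne.symm h, ih]

theorem get_eq_drop_go (l : List String) :
    Get_ID_length_list l = (groupLensGo "" 0 l).drop 1 := by
  simp [Get_ID_length_list, foldl_step_eq_go l "" 0 []]

-- B's enumerate/filter/map pass over (predecessor, current) pairs equals rcuts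
theorem enum_filter_eq_rcuts (ys : List String) :
    ∀ (prev : String) (k : Int),
      ((PySem.List.enumerate ((prev :: ys).zip ys) k).filter
        (fun p => p.2.1 != p.2.2)).map (fun p => p.1) = rcuts k prev ys := by
  induction ys with
  | nil => intro prev k; simp [rcuts, PySem.List.enumerate_nil]
  | cons y ys ih =>
    intro prev k
    have hih := ih y (k + 1)
    by_cases h : prev = y
    · simp only [List.zip, List.zipWith] at hih ⊢
      simp [PySem.List.enumerate_cons, rcuts, h, hih]
    · simp only [List.zip, List.zipWith] at hih ⊢
      simp [PySem.List.enumerate_cons, rcuts, h, hih, bne_iff_ne]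

-- B's zip-with-successor difference pass equals diffsFrom
theorem zip_diff_eq_diffsFrom (cs : List Int) :
    ∀ (c : Int) (n : Int),
      (((c :: cs).zip (cs ++ [n])).map (fun p => p.2 - p.1)) = diffsFrom c cs n := by
  induction cs with
  | nil => intro c n; simp [diffsFrom]
  | cons b bs ih => intro c n; simp [diffsFrom, ih]

-- differences of change points, from the last cut c, are run lengths from count k - c
theorem diffs_rcuts_eq_go (xs : List String) :
    ∀ (prev : String) (k c : Int),
      diffsFrom c (rcuts k prev xs) (k + xs.length) = groupLensGo prev (k - c) xs := by
  induction xs with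
  | nil =>
    intro prev k c
    simp only [rcuts, diffsFrom, groupLensGo, List.length_nil, Nat.cast_zero]
    congr 1; ring
  | cons y ys ih =>
    intro prev k c
    simp only [List.length_cons, Nat.cast_add, Nat.cast_one]
    by_cases h : prev = y
    · subst h
      rw [show rcuts k prev (prev :: ys) = rcuts (k + 1) prev ys from by simp [rcuts],
          show groupLensGo prev (k - c) (prev :: ys) = groupLensGo prev (k - c + 1) ys
            from by simp [groupLensGo],
          show k + ((ys.length : Int) + 1) = (k + 1) + (ys.length : Int) from by ring,
          ih prev (k + 1) c]
      congr 1; ring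
    · rw [show rcuts k prev (y :: ys) = k :: rcuts (k + 1) y ys from by simp [rcuts, h],
          show groupLensGo prev (k - c) (y :: ys) = (k - c) :: groupLensGo y 1 ys
            from by rw [groupLensGo, if_neg (fun hh => h hh.symm)],
          show diffsFrom c (k :: rcuts (k + 1) y ys) (k + ((ys.length : Int) + 1)) =
              (k - c) :: diffsFrom k (rcuts (k + 1) y ys) (k + ((ys.length : Int) + 1))
            from rfl,
          show k + ((ys.length : Int) + 1) = (k + 1) + (ys.length : Int) from by ring,
          ih y (k + 1) k,
          show (k : Int) + 1 - k = 1 from by ring]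

-- the whole difference pass equals A's "drop the first run" shape, for any first count
theorem mapDiffs_rcuts_eq_drop (xs : List String) :
    ∀ (prev : String) (k t : Int),
      mapDiffs (rcuts k prev xs) (k + xs.length) = (groupLensGo prev t xs).drop 1 := by
  induction xs with
  | nil => intro prev k t; simp [rcuts, mapDiffs, groupLensGo]
  | cons y ys ih =>
    intro prev k t
    simp only [List.length_cons, Nat.cast_add, Nat.cast_one]
    by_cases h : prev = y
    · subst h
      rw [show rcuts k prev (prev :: ys) = rcuts (k + 1) prev ys from by simp [rcuts],
          show groupLensGo prev t (prev :: ys) = groupLensGo prev (t + 1) ys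
            from by simp [groupLensGo],
          show k + ((ys.length : Int) + 1) = (k + 1) + (ys.length : Int) from by ring,
          ih prev (k + 1) (t + 1)]
    · rw [show rcuts k prev (y :: ys) = k :: rcuts (k + 1) y ys from by simp [rcuts, h],
          show groupLensGo prev t (y :: ys) = t :: groupLensGo y 1 ys
            from by rw [groupLensGo, if_neg (fun hh => h hh.symm)],
          show mapDiffs (k :: rcuts (k + 1) y ys) (k + ((ys.length : Int) + 1)) =
              diffsFrom k (rcuts (k + 1) y ys) (k + ((ys.length : Int) + 1)) from rfl,
          show k + ((ys.length : Int) + 1) = (k + 1) + (ys.length : Int) from by ring,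
          diffs_rcuts_eq_go ys y (k + 1) k,
          show (k : Int) + 1 - k = 1 from by ring]
      simp

-- B's zip/map difference pass is mapDiffs on the cut list
theorem zip_diff_eq_mapDiffs (cs : List Int) (n : Int) :
    ((cs.zip (cs.drop 1 ++ [n])).map (fun p => p.2 - p.1)) = mapDiffs cs n := by
  cases cs with
  | nil => simp [mapDiffs]
  | cons c cs' =>
    rw [show List.drop 1 (c :: cs') = cs' from rfl]
    exact zip_diff_eq_diffsFrom cs' c n

-- ===== VERDICT (by name: the statement is the Claim_ definition above) =====
theorem Get_ID_length_list_spec : Claim_equal_Get_ID_length_list := by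
  intro l _
  show Get_ID_length_list l = Get_ID_length_list_alt l
  rw [get_eq_drop_go]
  simp only [Get_ID_length_list_alt]
  rw [enum_filter_eq_rcuts l "" 0, zip_diff_eq_mapDiffs,
      show (l.length : Int) = 0 + (l.length : Int) from by ring,
      mapDiffs_rcuts_eq_drop l "" 0 0]
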